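-- pv_equiv track=rewrite | github.com/simran2195/LeetCode | 2465-shifting-letters-ii/shifting-letters-ii.py | shiftingLetters
-- ===== SOURCE A (Python) =====
-- from typing import List
--
-- def shiftingLetters(s: str, shifts: List[List[int]]) -> str:
--     n = len(s)
--     delta = [0] * (n + 1)  # Difference array
--
--     # Process the shifts into the difference array
--     for start, end, direction in shifts:
--         if direction == 1:
--             delta[start] += 1
--             delta[end + 1] -= 1
--         else:
--             delta[start] -= 1
--             delta[end + 1] += 1
--
--     # Accumulate the shifts to calculate the net shift for each character
--     net_shifts = [0] * n
--     shift = 0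
--     for i in range(n):
--         shift += delta[i]
--         net_shifts[i] = shift
--
--     # Apply the shifts to the string
--     result = []
--     for i in range(n):
--         # Calculate the new character after the net shift
--         new_char = chr((ord(s[i]) - ord('a') + net_shifts[i]) % 26 + ord('a'))
--         result.append(new_char)
--
--     return ''.join(result)
-- ===== SOURCE B (Python) =====
-- def shiftingLetters(s, shifts):
--     # Per-character scan: for each position, sum the shifts whose range covers it.
--     res = []
--     for i, c in enumerate(s):
--         k = 0
--         for a, b, d in shifts:
--             if a <= i <= b:
--                 k += 1 if d == 1 else -1
--         res.append(chr((ord(c) - ord('a') + k) % 26 + ord('a')))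
--     return ''.join(res)
-- ===== Notes on version B (the rewrite author's own statement) =====
-- stated objective: alternative
-- what changed: Replaces the difference-array + prefix-sum pipeline with a direct per-character scan that sums, for each position, the contributions of all shift ranges covering it (no auxiliary delta array, no prefix accumulation).
-- outside the precondition, e.g. on shiftingLetters('ab', [[-1, 1, 1]]): A returns 'ab', B returns 'bc'; on shiftingLetters('abc', [[2, 0, 1]]): A returns 'aac', B returns 'abc'
import Mathlib
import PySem

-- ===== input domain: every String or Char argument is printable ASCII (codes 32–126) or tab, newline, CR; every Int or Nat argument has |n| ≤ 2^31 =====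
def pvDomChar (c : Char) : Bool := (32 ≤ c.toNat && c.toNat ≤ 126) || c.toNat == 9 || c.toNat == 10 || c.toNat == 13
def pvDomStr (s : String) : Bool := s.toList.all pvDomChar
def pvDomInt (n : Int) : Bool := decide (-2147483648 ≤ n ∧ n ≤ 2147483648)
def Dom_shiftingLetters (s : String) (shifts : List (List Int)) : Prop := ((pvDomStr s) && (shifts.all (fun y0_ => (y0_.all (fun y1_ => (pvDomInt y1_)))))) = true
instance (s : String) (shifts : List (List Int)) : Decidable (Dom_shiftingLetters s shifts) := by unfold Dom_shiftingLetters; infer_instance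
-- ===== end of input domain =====

-- B replaces A's difference-array + prefix-sum pipeline by a direct per-character
-- scan over the shift triples (an alternative algorithm, not claimed faster).


-- ===== PORT A =====

-- Python 'delta[i] += v'; Pre_ keeps i within range so the IndexError case never fires
def pvBump (delta : List Int) (i : Int) (v : Int) : List Int :=
  PySem.List.pySetD delta i (PySem.List.pyGetD delta i 0 + v)

-- body of the 'for start, end, direction in shifts' loop; a non-triple raises in Python (Pre_ excludes)
def pvStepA (delta : List Int) (sh : List Int) : List Int :=
  match sh with
  | [start, e, direction] =>
      if direction = 1 then pvBump (pvBump delta start 1) (e + 1) (-1)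
      else pvBump (pvBump delta start (-1)) (e + 1) 1
  | _ => delta

-- chr((ord(c) - ord('a') + k) % 26 + ord('a'))
def pvChr (c : Char) (k : Int) : Char :=
  Char.ofNat (PySem.Int.mod ((c.toNat : Int) - 97 + k) 26 + 97).toNat

def shiftingLetters (s : String) (shifts : List (List Int)) : String :=
  let cs := s.toList
  let n := cs.length
  let delta := shifts.foldl pvStepA (List.replicate (n + 1) (0 : Int))
  let net := ((List.range n).foldl
      (fun (st : Int × List Int) (i : Nat) =>
        let sh := st.1 + PySem.List.pyGetD delta (i : Int) 0
        (sh, st.2 ++ [sh])) ((0 : Int), ([] : List Int))).2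
  let result := (List.range n).foldl
      (fun acc (i : Nat) => acc ++ [pvChr (cs.getD i ' ') (PySem.List.pyGetD net (i : Int) 0)]) []
  String.mk result

-- ===== PORT B =====

-- inner loop of B: sum over all shift triples covering position i
def pvAmtB (shifts : List (List Int)) (i : Int) : Int :=
  shifts.foldl
    (fun k sh =>
      match sh with
      | [a, b, d] => if a ≤ i ∧ i ≤ b then k + (if d = 1 then 1 else -1) else k
      | _ => k) 0

def shiftingLetters_alt (s : String) (shifts : List (List Int)) : String :=
  let cs := s.toList
  String.mk ((List.range cs.length).map (fun i => pvChr (cs.getD i ' ') (pvAmtB shifts (i : Int))))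

-- ===== PRECONDITION & SPEC =====
-- Pre_ restricts shifts to the task's natural domain (triples with 0 ≤ start ≤ end < len(s)):
-- outside it A either raises IndexError/ValueError, or — for negative or inverted ranges —
-- returns an accidental value of its difference-array index arithmetic that no one would specify.
def Pre_shiftingLetters (s : String) (shifts : List (List Int)) : Prop :=
  ∀ sh ∈ shifts, sh.length = 3 ∧ 0 ≤ sh.getD 0 0 ∧ sh.getD 0 0 ≤ sh.getD 1 0 ∧
    sh.getD 1 0 < (s.toList.length : Int)
instance (s : String) (shifts : List (List Int)) : Decidable (Pre_shiftingLetters s shifts) := by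
  unfold Pre_shiftingLetters; infer_instance

def pvWitness_shiftingLetters : String × List (List Int) := ("abc", [[0, 1, 1], [1, 2, -1]])

def Spec_shiftingLetters (s : String) (shifts : List (List Int)) (out : String) : Prop := out = shiftingLetters_alt s shifts
instance (s : String) (shifts : List (List Int)) (out : String) : Decidable (Spec_shiftingLetters s shifts out) := by unfold Spec_shiftingLetters; infer_instance

-- ===== CLAIM (what is proved, stated in full; the proofs are below) =====
def Claim_equal_shiftingLetters : Prop := ∀ (s : String) (shifts : List (List Int)), Dom_shiftingLetters s shifts → Pre_shiftingLetters s shifts → Spec_shiftingLetters s shifts (shiftingLetters s shifts)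

-- ===== LEMMAS AND PROOFS =====

-- contribution of one shift triple to position i (proof-side view of B's inner loop)
def pvContrib (sh : List Int) (i : Int) : Int :=
  match sh with
  | [a, b, d] => if a ≤ i ∧ i ≤ b then (if d = 1 then 1 else -1) else 0
  | _ => 0

theorem pvStepA_triple (l : List Int) (a b d : Int) :
    pvStepA l [a, b, d]
      = if d = 1 then pvBump (pvBump l a 1) (b + 1) (-1)
        else pvBump (pvBump l a (-1)) (b + 1) 1 := rfl

theorem pvAmtB_eq_sum (shifts : List (List Int)) (i : Int) :
    pvAmtB shifts i = (shifts.map (fun sh => pvContrib sh i)).sum := by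
  suffices h : ∀ (shifts : List (List Int)) (k0 : Int),
      shifts.foldl
        (fun k sh =>
          match sh with
          | [a, b, d] => if a ≤ i ∧ i ≤ b then k + (if d = 1 then 1 else -1) else k
          | _ => k) k0 = k0 + (shifts.map (fun sh => pvContrib sh i)).sum by
    simpa using h shifts 0
  intro shifts
  induction shifts with
  | nil => simp
  | cons sh rest ih =>
    intro k0
    simp only [List.foldl_cons, List.map_cons, List.sum_cons, ih]
    rcases sh with _ | ⟨a, _ | ⟨b, _ | ⟨d, _ | ⟨x, tl⟩⟩⟩⟩ <;>
      simp only [pvContrib] <;> first | (split_ifs <;> ring) | ring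

theorem sum_take_succ_getD (l : List Int) (n : Nat) :
    (l.take (n + 1)).sum = (l.take n).sum + l.getD n 0 := by
  rw [List.take_succ, List.sum_append, List.getD_eq_getElem?_getD]
  cases l[n]? <;> simp

theorem bump_take_sum (l : List Int) (j : Int) (v : Int) (k : Nat)
    (h0 : 0 ≤ j) (h1 : j.toNat < l.length) :
    ((pvBump l j v).take k).sum = (l.take k).sum + (if j.toNat < k then v else 0) := by
  unfold pvBump
  rw [PySem.List.pySetD_of_nonneg _ _ h0, PySem.List.pyGetD_of_nonneg _ _ h0]
  induction k with
  | zero => simp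
  | succ k ih =>
    rw [sum_take_succ_getD, sum_take_succ_getD, ih]
    by_cases hk : k = j.toNat
    · subst hk
      rw [List.getD_eq_getElem?_getD, List.getElem?_set_self (by simpa using h1)]
      simp only [Option.getD_some]
      rw [List.getD_eq_getElem?_getD]
      split_ifs <;> omega
    · rw [List.getD_eq_getElem?_getD, List.getElem?_set_ne (by omega),
        ← List.getD_eq_getElem?_getD]
      split_ifs <;> omega

theorem length_pvBump (l : List Int) (j v : Int) : (pvBump l j v).length = l.length := by
  unfold pvBump; exact PySem.List.length_pySetD _ _ _

-- key invariant: prefix sums of A's difference array equal B's per-position sums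
theorem prefix_foldl_stepA (n : Nat) (shifts : List (List Int)) (l : List Int)
    (hlen : l.length = n + 1)
    (hv : ∀ sh ∈ shifts, sh.length = 3 ∧ 0 ≤ sh.getD 0 0 ∧ sh.getD 0 0 ≤ sh.getD 1 0 ∧
      sh.getD 1 0 < (n : Int))
    (i : Nat) (hi : i < n) :
    ((shifts.foldl pvStepA l).take (i + 1)).sum
      = (l.take (i + 1)).sum + pvAmtB shifts (i : Int) := by
  rw [pvAmtB_eq_sum]
  induction shifts generalizing l with
  | nil => simp
  | cons sh rest ih =>
    obtain ⟨h3, ha0, hab, hbn⟩ := hv sh List.mem_cons_self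
    match sh, h3 with
    | [a, b, d], _ =>
      simp only [List.getD_cons_zero, List.getD_cons_succ] at ha0 hab hbn
      have hlen' : (pvStepA l [a, b, d]).length = n + 1 := by
        rw [pvStepA_triple]; split_ifs <;> simp [length_pvBump, hlen]
      have hbump : ((pvStepA l [a, b, d]).take (i + 1)).sum
          = (l.take (i + 1)).sum + pvContrib [a, b, d] (i : Int) := by
        have hlb1 : a.toNat < l.length := by rw [hlen]; omega
        have hlb2 : (b + 1).toNat < (pvBump l a (1 : Int)).length := by
          rw [length_pvBump, hlen]; omega
        have hlb2' : (b + 1).toNat < (pvBump l a (-1 : Int)).length := by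
          rw [length_pvBump, hlen]; omega
        have e1 : a.toNat < i + 1 ↔ a ≤ (i : Int) := by omega
        have e2 : (b + 1).toNat < i + 1 ↔ ¬((i : Int) ≤ b) := by omega
        rw [pvStepA_triple]
        by_cases hd : d = 1
        · rw [if_pos hd, bump_take_sum _ _ _ _ (by omega) hlb2,
            bump_take_sum _ _ _ _ ha0 hlb1]
          simp only [pvContrib, hd]
          rw [add_assoc]
          congr 1
          simp only [e1, e2]
          by_cases h1 : a ≤ (i : Int) <;> by_cases h2 : (i : Int) ≤ b <;>
            simp [h1, h2] <;> omega
        · rw [if_neg hd, bump_take_sum _ _ _ _ (by omega) hlb2',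
            bump_take_sum _ _ _ _ ha0 hlb1]
          simp only [pvContrib]
          rw [add_assoc]
          congr 1
          simp only [e1, e2]
          by_cases h1 : a ≤ (i : Int) <;> by_cases h2 : (i : Int) ≤ b <;>
            simp [h1, h2, hd] <;> omega
      simp only [List.foldl_cons, List.map_cons, List.sum_cons]
      rw [ih _ hlen' (fun x hx => hv x (List.mem_cons_of_mem _ hx)), hbump]
      ring

-- A's net-shift loop produces the list of prefix sums of delta
theorem net_loop_eq (delta : List Int) (n : Nat) :
    (List.range n).foldl
      (fun (st : Int × List Int) (i : Nat) =>
        let sh := st.1 + PySem.List.pyGetD delta (i : Int) 0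
        (sh, st.2 ++ [sh])) ((0 : Int), ([] : List Int))
    = ((delta.take n).sum, (List.range n).map (fun i => (delta.take (i + 1)).sum)) := by
  induction n with
  | zero => simp
  | succ n ih =>
    rw [List.range_succ, List.foldl_append, List.map_append, ih]
    simp only [List.foldl_cons, List.foldl_nil, List.map_cons, List.map_nil]
    rw [PySem.List.pyGetD_natCast, ← sum_take_succ_getD]

-- A's result loop is a map over the indices
theorem result_loop_eq (f : Nat → Char) (n : Nat) :
    (List.range n).foldl (fun acc (i : Nat) => acc ++ [f i]) [] = (List.range n).map f := by
  simpa using PySem.List.foldl_append_singleton_eq_map f (List.range n) []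

-- ===== VERDICT (by name: the statement is the Claim_ definition above) =====
theorem shiftingLetters_spec : Claim_equal_shiftingLetters := by
  intro s shifts _ hpre
  unfold Spec_shiftingLetters shiftingLetters shiftingLetters_alt
  simp only [net_loop_eq, result_loop_eq]
  congr 1
  apply List.map_congr_left
  intro i hi
  rw [List.mem_range] at hi
  congr 1
  rw [PySem.List.pyGetD_natCast]
  rw [List.getD_eq_getElem?_getD, List.getElem?_map, List.getElem?_range hi]
  simp only [Option.map_some, Option.getD_some]
  rw [prefix_foldl_stepA s.toList.length shifts _ (by simp) hpre i hi]
  simp
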